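-- pv_equiv track=rewrite | github.com/ysx001/sg2im | process_metadata.py | match_objs
-- ===== SOURCE A (Python) =====
-- def match_objs(sg_objs, coco_objs):
--     match = {}
--     idx_map = {}
--     sg_idx = 0
--     new_sg_idx = 0
--     for sg_obj in sg_objs:
--       for coco_obj in coco_objs:
--         if ((sg_obj in coco_obj) or (coco_obj in sg_obj)):
--           match[sg_obj] = coco_obj
--           break
--       if match.get(sg_obj, None) != None:
--         idx_map[sg_idx] = new_sg_idx
--         new_sg_idx += 1
--       sg_idx += 1
--
--     return match, idx_map
-- ===== SOURCE B (Python) =====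
-- def match_objs(sg_objs, coco_objs):
--     # Worklist algorithm, transposed: sweep coco_objs once (coco-major), keeping the
--     # distinct sg objects not yet matched in a worklist that shrinks as matches are
--     # found; stops as soon as everything is matched.  best[sg] is the first matching
--     # coco object since a matched sg leaves the worklist and is never overwritten.
--     best = {}
--     remaining = list(dict.fromkeys(sg_objs))
--     for c in coco_objs:
--         if not remaining:
--             break
--         still = []
--         for sg in remaining:
--             if sg in c or c in sg:
--                 best[sg] = c
--             else:
--                 still.append(sg)
--         remaining = still
--     # rebuild match in sg_objs first-occurrence order (A's insertion order)
--     match = {}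
--     for sg in sg_objs:
--         if sg in best:
--             match[sg] = best[sg]
--     idx_map = {}
--     j = 0
--     for i, sg in enumerate(sg_objs):
--         if sg in best:
--             idx_map[i] = j
--             j += 1
--     return match, idx_map
-- ===== Notes on version B (the rewrite author's own statement) =====
-- stated objective: alternative
-- what changed: Replaces A's sg-major nested scan with break (first matching coco per sg) by a transposed coco-major worklist sweep: the distinct not-yet-matched sg objects are kept in a worklist that shrinks as a single pass over coco_objs assigns each its first matching coco, then match and idx_map are rebuilt in two rescans of sg_objs.
import Mathlib
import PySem

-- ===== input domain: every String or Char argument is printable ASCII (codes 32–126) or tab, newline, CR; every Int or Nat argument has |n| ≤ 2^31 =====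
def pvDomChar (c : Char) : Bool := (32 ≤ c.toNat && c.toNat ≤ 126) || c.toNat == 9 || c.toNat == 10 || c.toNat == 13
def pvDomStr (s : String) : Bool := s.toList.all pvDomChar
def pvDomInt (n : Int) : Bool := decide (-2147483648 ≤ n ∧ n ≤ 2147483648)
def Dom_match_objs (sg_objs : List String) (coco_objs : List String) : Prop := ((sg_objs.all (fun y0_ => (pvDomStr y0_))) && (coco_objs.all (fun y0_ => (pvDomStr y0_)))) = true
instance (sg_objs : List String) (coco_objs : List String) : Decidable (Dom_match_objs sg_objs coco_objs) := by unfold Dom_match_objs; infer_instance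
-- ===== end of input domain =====

-- B replaces A's sg-major first-match scan (inner loop with break) by a transposed
-- coco-major worklist sweep (distinct unmatched sg objects shrink as matches are
-- found), then rebuilds match and idx_map in two rescans; alternative algorithm,
-- same return value.

-- ===== PORT A =====
-- inner `for coco_obj in coco_objs: if … : match[sg_obj] = coco_obj; break`
def matchObjsInnerA (coco_objs : List String) (m : PySem.Dict String String)
    (sg_obj : String) : PySem.Dict String String :=
  match coco_objs with
  | [] => m
  | c :: rest =>
      if PySem.Str.isIn sg_obj c || PySem.Str.isIn c sg_obj then m.insert sg_obj c
      else matchObjsInnerA rest m sg_obj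

-- outer loop, state (match, idx_map, sg_idx, new_sg_idx)
def matchObjsLoopA (coco_objs : List String) (sgs : List String)
    (m : PySem.Dict String String) (im : PySem.Dict Int Int) (sg_idx new_sg_idx : Int) :
    PySem.Dict String String × PySem.Dict Int Int :=
  match sgs with
  | [] => (m, im)
  | sg :: rest =>
      let m' := matchObjsInnerA coco_objs m sg
      -- `match.get(sg_obj, None) != None`
      if (m'.get? sg).isSome then
        matchObjsLoopA coco_objs rest m' (im.insert sg_idx new_sg_idx) (sg_idx + 1) (new_sg_idx + 1)
      else
        matchObjsLoopA coco_objs rest m' im (sg_idx + 1) new_sg_idx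

def match_objs (sg_objs : List String) (coco_objs : List String) :
    (List (String × String)) × (List (Int × Int)) :=
  let r := matchObjsLoopA coco_objs sg_objs PySem.Dict.empty PySem.Dict.empty 0 0
  (r.1.items, r.2.items)

-- ===== PORT B =====
-- `if sg in c or c in sg`
def matchesB (sg c : String) : Bool := PySem.Str.isIn sg c || PySem.Str.isIn c sg

-- `for c in coco_objs:` with `if not remaining: break`; inner pass splits the
-- worklist into matched (inserted into best) and still-unmatched
def worklistB (best : PySem.Dict String String) (remaining : List String)
    (cocos : List String) : PySem.Dict String String :=
  match cocos with
  | [] => best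
  | c :: rest =>
      if remaining = [] then best
      else
        let st := remaining.foldl
          (fun (acc : PySem.Dict String String × List String) sg =>
            if matchesB sg c then (acc.1.insert sg c, acc.2)
            else (acc.1, acc.2 ++ [sg]))
          (best, [])
        worklistB st.1 st.2 rest

def match_objs_alt (sg_objs : List String) (coco_objs : List String) :
    (List (String × String)) × (List (Int × Int)) :=
  -- `remaining = list(dict.fromkeys(sg_objs))`, then the coco-major worklist sweep
  let best := worklistB PySem.Dict.empty (PySem.Set.ofList sg_objs) coco_objs
  -- `for sg in sg_objs: if sg in best: match[sg] = best[sg]`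
  let m := sg_objs.foldl
    (fun d sg => match best.get? sg with
                 | some c => d.insert sg c
                 | none => d)
    PySem.Dict.empty
  -- `for i, sg in enumerate(sg_objs)` with counter j; state (idx_map, i, j)
  let st := sg_objs.foldl
    (fun (acc : PySem.Dict Int Int × Int × Int) sg =>
      if best.contains sg then (acc.1.insert acc.2.1 acc.2.2, acc.2.1 + 1, acc.2.2 + 1)
      else (acc.1, acc.2.1 + 1, acc.2.2))
    (PySem.Dict.empty, 0, 0)
  (m.items, st.1.items)

-- ===== PRECONDITION & SPEC =====
def Spec_match_objs (sg_objs : List String) (coco_objs : List String) (out : (List (String × String)) × (List (Int × Int))) : Prop := out = match_objs_alt sg_objs coco_objs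
instance (sg_objs : List String) (coco_objs : List String) (out : (List (String × String)) × (List (Int × Int))) : Decidable (Spec_match_objs sg_objs coco_objs out) := by unfold Spec_match_objs; infer_instance

-- ===== CLAIM (what is proved, stated in full; the proofs are below) =====
def Claim_equal_match_objs : Prop := ∀ (sg_objs : List String) (coco_objs : List String), Dom_match_objs sg_objs coco_objs → Spec_match_objs sg_objs coco_objs (match_objs sg_objs coco_objs)

-- ===== LEMMAS AND PROOFS =====

-- proof-side characterisation: the first coco object matching sg, if any
def findFirst (coco_objs : List String) (sg : String) : Option String :=
  match coco_objs with
  | [] => none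
  | c :: rest => if matchesB sg c then some c else findFirst rest sg

-- A's inner loop computes exactly "insert the first match, if any"
theorem innerA_eq (coco_objs : List String) (m : PySem.Dict String String) (sg : String) :
    matchObjsInnerA coco_objs m sg =
      match findFirst coco_objs sg with
      | some c => m.insert sg c
      | none => m := by
  induction coco_objs with
  | nil => rfl
  | cons c rest ih =>
      simp only [matchObjsInnerA, findFirst, matchesB]
      split_ifs with h <;> simp [ih]

-- shared match-building step (A's outer loop reduces to a fold of this)
def stepM (coco_objs : List String) (d : PySem.Dict String String) (sg : String) :
    PySem.Dict String String :=
  match findFirst coco_objs sg with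
  | some c => d.insert sg c
  | none => d

-- canonical idx_map builder driven by the input-level predicate (findFirst …).isSome
def canonIM (coco_objs : List String) (sgs : List String) (i j : Int)
    (im : PySem.Dict Int Int) : PySem.Dict Int Int :=
  match sgs with
  | [] => im
  | sg :: rest =>
      if (findFirst coco_objs sg).isSome then
        canonIM coco_objs rest (i + 1) (j + 1) (im.insert i j)
      else
        canonIM coco_objs rest (i + 1) j im

-- A's loop = (fold of stepM, canonical idx_map), under the key invariant
theorem loopA_eq (coco_objs : List String) (sgs : List String)
    (m : PySem.Dict String String) (im : PySem.Dict Int Int) (i j : Int)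
    (hP : ∀ s, m.contains s = true → (findFirst coco_objs s).isSome) :
    matchObjsLoopA coco_objs sgs m im i j =
      (sgs.foldl (stepM coco_objs) m, canonIM coco_objs sgs i j im) := by
  induction sgs generalizing m im i j with
  | nil => rfl
  | cons sg rest ih =>
      simp only [matchObjsLoopA, innerA_eq, List.foldl_cons, canonIM]
      cases hf : findFirst coco_objs sg with
      | some c =>
          have hsome : (((m.insert sg c).get? sg).isSome) = true := by
            simp [PySem.Dict.get?_insert_self]
          simp only [hsome, if_true]
          rw [ih (m.insert sg c) _ _ _ ?_]
          · simp [stepM, hf]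
          · intro s hs
            rw [PySem.Dict.contains_insert] at hs
            rcases Bool.or_eq_true_iff.mp hs with h | h
            · have : s = sg := by simpa using h
              subst this; simp [hf]
            · exact hP s h
      | none =>
          have hnone : ((m.get? sg).isSome) = false := by
            cases hc : (m.get? sg).isSome with
            | false => rfl
            | true =>
                exfalso
                have : m.contains sg = true := by
                  rw [PySem.Dict.contains_eq_isSome_get?]; exact hc
                have := hP sg this
                simp [hf] at this
          simp only [hnone, Bool.false_eq_true, if_false]
          rw [ih m im _ _ hP]
          simp [stepM, hf]

-- B's inner worklist pass, pointwise on the dict and exactly on the new worklist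
theorem innerW (remaining : List String) (c : String)
    (best : PySem.Dict String String) (acc : List String) (s : String) :
    (remaining.foldl
      (fun (acc : PySem.Dict String String × List String) sg =>
        if matchesB sg c then (acc.1.insert sg c, acc.2)
        else (acc.1, acc.2 ++ [sg]))
      (best, acc)).1.get? s
        = (if s ∈ remaining ∧ matchesB s c then some c else best.get? s) ∧
    (remaining.foldl
      (fun (acc : PySem.Dict String String × List String) sg =>
        if matchesB sg c then (acc.1.insert sg c, acc.2)
        else (acc.1, acc.2 ++ [sg]))
      (best, acc)).2
        = acc ++ remaining.filter (fun sg => !matchesB sg c) := by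
  induction remaining generalizing best acc with
  | nil => simp
  | cons sg rest ih =>
      simp only [List.foldl_cons, List.filter_cons]
      by_cases hm : matchesB sg c = true
      · simp only [hm, if_true, Bool.not_true, if_neg (by simp : ¬ (false = true))]
        refine ⟨?_, (ih (best.insert sg c) acc).2⟩
        rw [(ih (best.insert sg c) acc).1, PySem.Dict.get?_insert]
        by_cases hsr : s ∈ rest ∧ matchesB s c = true
        · simp [hsr]
        · by_cases hse : s = sg
          · subst hse; simp [hm]
          · simp [hsr, hse]
      · simp only [hm, Bool.false_eq_true, if_false, Bool.not_false]
        refine ⟨?_, by rw [(ih best (acc ++ [sg])).2]; simp⟩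
        rw [(ih best (acc ++ [sg])).1]
        by_cases hsr : s ∈ rest ∧ matchesB s c = true
        · simp [hsr]
        · by_cases hse : s = sg
          · subst hse; simp [hm]
          · simp only [hsr, if_false, List.mem_cons]
            have : ¬ ((s = sg ∨ s ∈ rest) ∧ matchesB s c = true) := by
              rintro ⟨hq | hq, hmc⟩
              · subst hq; exact hm hmc
              · exact hsr ⟨hq, hmc⟩
            simp [this]

-- the worklist sweep computes findFirst at every key of the worklist, and leaves
-- every other key untouched
theorem worklistB_get? (cocos : List String) (best : PySem.Dict String String)
    (remaining : List String) (s : String) :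
    (worklistB best remaining cocos).get? s =
      if s ∈ remaining then (findFirst cocos s).elim (best.get? s) some
      else best.get? s := by
  induction cocos generalizing best remaining with
  | nil => simp [worklistB, findFirst]
  | cons c rest ih =>
      simp only [worklistB]
      by_cases hrem : remaining = []
      · subst hrem; simp
      · simp only [hrem, if_false]
        rw [ih]
        have h1 := (innerW remaining c best [] s).1
        have h2 := (innerW remaining c best [] s).2
        rw [h1, h2]
        simp only [List.nil_append, List.mem_filter, findFirst]
        by_cases hin : s ∈ remaining
        · by_cases hm : matchesB s c = true
          · simp [hin, hm]
          · simp [hin, hm]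
        · have hns : ¬ (s ∈ remaining ∧ matchesB s c = true) := fun h => hin h.1
          simp [hin]

-- B's idx_map pass = the canonical builder, when the table's membership
-- agrees with findFirst on every remaining element
theorem foldB_eq (coco_objs : List String) (m : PySem.Dict String String)
    (sgs : List String) (im : PySem.Dict Int Int) (i j : Int)
    (hm : ∀ s ∈ sgs, m.contains s = (findFirst coco_objs s).isSome) :
    (sgs.foldl
      (fun (acc : PySem.Dict Int Int × Int × Int) sg =>
        if m.contains sg then (acc.1.insert acc.2.1 acc.2.2, acc.2.1 + 1, acc.2.2 + 1)
        else (acc.1, acc.2.1 + 1, acc.2.2))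
      (im, i, j)).1 = canonIM coco_objs sgs i j im := by
  induction sgs generalizing im i j with
  | nil => rfl
  | cons sg rest ih =>
      simp only [List.foldl_cons, canonIM]
      rw [hm sg (List.mem_cons_self ..)]
      cases hf : (findFirst coco_objs sg).isSome with
      | true => simp only [if_true]; exact ih _ _ _ (fun s hs => hm s (List.mem_cons_of_mem _ hs))
      | false => simp only [Bool.false_eq_true, if_false]; exact ih _ _ _ (fun s hs => hm s (List.mem_cons_of_mem _ hs))

-- ===== VERDICT (by name: the statement is the Claim_ definition above) =====
theorem match_objs_spec : Claim_equal_match_objs := by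
  intro sg_objs coco_objs _
  unfold Spec_match_objs match_objs match_objs_alt
  rw [loopA_eq coco_objs sg_objs PySem.Dict.empty PySem.Dict.empty 0 0
      (by intro s hs; simp at hs)]
  have hget : ∀ s ∈ sg_objs,
      (worklistB PySem.Dict.empty (PySem.Set.ofList sg_objs) coco_objs).get? s
        = findFirst coco_objs s := by
    intro s hs
    rw [worklistB_get?]
    have hmem : s ∈ (PySem.Set.ofList sg_objs : List String) :=
      (PySem.Set.mem_ofList ..).mpr hs
    simp only [hmem, if_true, PySem.Dict.get?_empty]
    cases findFirst coco_objs s <;> rfl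
  have hcont : ∀ s ∈ sg_objs,
      (worklistB PySem.Dict.empty (PySem.Set.ofList sg_objs) coco_objs).contains s
        = (findFirst coco_objs s).isSome := by
    intro s hs
    rw [PySem.Dict.contains_eq_isSome_get?, hget s hs]
  have hM : sg_objs.foldl
      (fun d sg => match (worklistB PySem.Dict.empty (PySem.Set.ofList sg_objs) coco_objs).get? sg with
                   | some c => d.insert sg c
                   | none => d)
      PySem.Dict.empty = sg_objs.foldl (stepM coco_objs) PySem.Dict.empty := by
    apply PySem.List.foldl_congr_mem
    intro acc x hx
    rw [hget x hx]; rfl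
  have hI := foldB_eq coco_objs
    (worklistB PySem.Dict.empty (PySem.Set.ofList sg_objs) coco_objs)
    sg_objs PySem.Dict.empty 0 0 hcont
  simp only [hM, hI]
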